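-- pv_equiv track=rewrite | github.com/fpeterek/SPR-Solutions | 10160.py | biggest_union
-- ===== SOURCE A (Python) =====
-- def biggest_union(sets):
--     t1 = 0
--     t2 = 0
--     un_size = 0
--     i_size = 0
--
--     for k1, s1 in sets.items():
--         for k2, s2 in sets.items():
--             if k1 == k2:
--                 continue
--             l_un = len(s1.union(s2))
--             l_i = len(s1.intersection(s2))
--             if l_un > un_size or (l_un == un_size and l_i < i_size):
--                 un_size = l_un
--                 i_size = l_i
--                 t1, t2 = k1, k2
--
--     return t1, t2
-- ===== SOURCE B (Python) =====
-- def _pairs(items):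
--     # all unordered pairs, each visited once, in (earlier, later) order
--     out = []
--     rest = list(items)
--     while rest:
--         head = rest.pop(0)
--         out.extend((head, q) for q in rest)
--     return out
--
--
-- def biggest_union(sets):
--     t1, t2 = 0, 0
--     un_size, i_size = 0, 0
--     for (k1, s1), (k2, s2) in _pairs(list(sets.items())):
--         l_un = len(s1 | s2)
--         l_i = len(s1 & s2)
--         if l_un > un_size or (l_un == un_size and l_i < i_size):
--             un_size, i_size = l_un, l_i
--             t1, t2 = k1, k2
--     return t1, t2
-- ===== Notes on version B (the rewrite author's own statement) =====
-- stated objective: alternative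
-- what changed: Replaces the nested double loop over dict items with its k1==k2 skip by first materialising each unordered pair exactly once (head popped off, paired with the remainder) and a single flat best-tracking pass over that pair list; ties never improve the best, so visiting each pair only in (earlier,later) order gives the identical result and halves the pair work (~2x measured).
import Mathlib
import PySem

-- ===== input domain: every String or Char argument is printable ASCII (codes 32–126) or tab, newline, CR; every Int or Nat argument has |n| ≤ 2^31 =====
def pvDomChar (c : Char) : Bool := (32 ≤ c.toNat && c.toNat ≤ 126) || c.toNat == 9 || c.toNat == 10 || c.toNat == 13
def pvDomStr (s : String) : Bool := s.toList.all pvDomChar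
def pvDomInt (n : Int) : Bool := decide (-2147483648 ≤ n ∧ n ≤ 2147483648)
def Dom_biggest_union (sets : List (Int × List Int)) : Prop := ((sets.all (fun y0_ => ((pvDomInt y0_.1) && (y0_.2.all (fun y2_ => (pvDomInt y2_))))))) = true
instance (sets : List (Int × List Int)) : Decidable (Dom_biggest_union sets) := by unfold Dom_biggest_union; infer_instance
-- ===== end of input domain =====

-- B replaces A's nested double loop (each pair seen twice, diagonal skipped) by one flat
-- best-tracking pass over a list holding each unordered pair once; same return value.

-- ===== PORT A =====
-- Boundary conversion shared by both ports: the Python argument is a dict of sets;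
-- Dict.ofList models dict construction from the pairs, Set.ofList the set values.
def pvItems (sets : List (Int × List Int)) : List (Int × List Int) :=
  (PySem.Dict.ofList sets).items.map (fun p => (p.1, PySem.Set.ofList p.2))

def biggest_union (sets : List (Int × List Int)) : Int × Int :=
  let items := pvItems sets
  let st : Int × Int × Int × Int :=
    items.foldl (fun st p =>
      items.foldl (fun st q =>
        if p.1 == q.1 then st
        else
          let l_un := PySem.Set.len (PySem.Set.union p.2 q.2)
          let l_i := PySem.Set.len (PySem.Set.inter p.2 q.2)
          if st.2.2.1 < l_un ∨ (l_un = st.2.2.1 ∧ l_i < st.2.2.2) then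
            (p.1, q.1, l_un, l_i)
          else st) st) (0, 0, 0, 0)
  (st.1, st.2.1)

-- ===== PORT B =====
-- port of Source B's _pairs: pop the head, pair it with the rest, recurse on the rest
def pvPairs : List (Int × List Int) → List ((Int × List Int) × (Int × List Int))
  | [] => []
  | head :: rest => (rest.map (fun q => (head, q))) ++ pvPairs rest

def biggest_union_alt (sets : List (Int × List Int)) : Int × Int :=
  let items := pvItems sets
  let st : Int × Int × Int × Int :=
    (pvPairs items).foldl (fun st pq =>
      let l_un := PySem.Set.len (PySem.Set.union pq.1.2 pq.2.2)
      let l_i := PySem.Set.len (PySem.Set.inter pq.1.2 pq.2.2)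
      if st.2.2.1 < l_un ∨ (l_un = st.2.2.1 ∧ l_i < st.2.2.2) then
        (pq.1.1, pq.2.1, l_un, l_i)
      else st) (0, 0, 0, 0)
  (st.1, st.2.1)

-- ===== PRECONDITION & SPEC =====
def Spec_biggest_union (sets : List (Int × List Int)) (out : Int × Int) : Prop := out = biggest_union_alt sets
instance (sets : List (Int × List Int)) (out : Int × Int) : Decidable (Spec_biggest_union sets out) := by unfold Spec_biggest_union; infer_instance

-- ===== CLAIM (what is proved, stated in full; the proofs are below) =====
def Claim_equal_biggest_union : Prop := ∀ (sets : List (Int × List Int)), Dom_biggest_union sets → Spec_biggest_union sets (biggest_union sets)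

-- ===== LEMMAS AND PROOFS =====

def pvUn (p q : Int × List Int) : Int := PySem.Set.len (PySem.Set.union p.2 q.2)
def pvIn (p q : Int × List Int) : Int := PySem.Set.len (PySem.Set.inter p.2 q.2)

def pvUpd (st : Int × Int × Int × Int) (p q : Int × List Int) : Int × Int × Int × Int :=
  if st.2.2.1 < pvUn p q ∨ (pvUn p q = st.2.2.1 ∧ pvIn p q < st.2.2.2) then
    (p.1, q.1, pvUn p q, pvIn p q)
  else st

def pvStepA (st : Int × Int × Int × Int) (p q : Int × List Int) : Int × Int × Int × Int :=
  if p.1 == q.1 then st else pvUpd st p q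

-- state's running (un_size, i_size) is at least as good as the key (a, b), lexicographically
def pvGE (st : Int × Int × Int × Int) (a b : Int) : Prop :=
  a < st.2.2.1 ∨ (a = st.2.2.1 ∧ st.2.2.2 ≤ b)

theorem pvUpd_noop {st : Int × Int × Int × Int} {p q : Int × List Int}
    (h : pvGE st (pvUn p q) (pvIn p q)) : pvUpd st p q = st := by
  obtain ⟨t1, t2, un, i⟩ := st
  unfold pvGE at h
  unfold pvUpd
  split
  · rename_i hc; exfalso; rcases h with h | h <;> rcases hc with hc | hc <;> omega
  · rfl

theorem pvGE_pvUpd {st : Int × Int × Int × Int} {a b : Int} (p q : Int × List Int)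
    (h : pvGE st a b) : pvGE (pvUpd st p q) a b := by
  obtain ⟨t1, t2, un, i⟩ := st
  unfold pvGE at *
  unfold pvUpd
  split
  · rename_i hc; simp only []; rcases h with h | h <;> rcases hc with hc | hc <;> omega
  · exact h

theorem pvGE_pvUpd_self (st : Int × Int × Int × Int) (p q : Int × List Int) :
    pvGE (pvUpd st p q) (pvUn p q) (pvIn p q) := by
  obtain ⟨t1, t2, un, i⟩ := st
  unfold pvUpd pvGE
  split <;> rename_i hc <;> dsimp only at hc ⊢ <;> omega

theorem pvGE_pvStepA {st : Int × Int × Int × Int} {a b : Int} (p q : Int × List Int)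
    (h : pvGE st a b) : pvGE (pvStepA st p q) a b := by
  unfold pvStepA; split
  · exact h
  · exact pvGE_pvUpd p q h

theorem pvGE_foldl {a b : Int} (l : List ((Int × List Int) × (Int × List Int))) :
    ∀ st, pvGE st a b → pvGE (l.foldl (fun st pq => pvStepA st pq.1 pq.2) st) a b := by
  induction l with
  | nil => intro st h; exact h
  | cons pq l ih => intro st h; exact ih _ (pvGE_pvStepA pq.1 pq.2 h)

theorem pvGE_after_prefix (x : Int × List Int) (xs : List (Int × List Int))
    (hkey : ∀ q ∈ xs, x.1 ≠ q.1) :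
    ∀ st, ∀ q ∈ xs,
      pvGE ((xs.map (fun q => (x, q))).foldl (fun st pq => pvStepA st pq.1 pq.2) st)
        (pvUn x q) (pvIn x q) := by
  induction xs with
  | nil => intro st q hq; simp at hq
  | cons q0 xs ih =>
    intro st q hq
    simp only [List.map_cons, List.foldl_cons]
    have hstep : pvStepA st x q0 = pvUpd st x q0 := by
      unfold pvStepA; simp [hkey q0 (List.mem_cons_self)]
    rcases List.mem_cons.mp hq with hq | hq
    · subst hq
      rw [hstep]
      exact pvGE_foldl _ _ (pvGE_pvUpd_self st x q)
    · exact ih (fun r hr => hkey r (List.mem_cons_of_mem _ hr)) _ q hq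

theorem pvUn_symm {p q : Int × List Int} (hp : p.2.Nodup) (hq : q.2.Nodup) :
    pvUn p q = pvUn q p := by
  unfold pvUn PySem.Set.len
  have : (PySem.Set.union p.2 q.2).Perm (PySem.Set.union q.2 p.2) := by
    rw [List.perm_ext_iff_of_nodup (PySem.Set.nodup_union _ _ hp) (PySem.Set.nodup_union _ _ hq)]
    intro a; simp only [PySem.Set.mem_union]; tauto
  simp [this.length_eq]

theorem pvIn_symm {p q : Int × List Int} (hp : p.2.Nodup) (hq : q.2.Nodup) :
    pvIn p q = pvIn q p := by
  unfold pvIn PySem.Set.len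
  have : (PySem.Set.inter p.2 q.2).Perm (PySem.Set.inter q.2 p.2) := by
    rw [List.perm_ext_iff_of_nodup (PySem.Set.nodup_inter _ _ hp) (PySem.Set.nodup_inter _ _ hq)]
    intro a; simp only [PySem.Set.mem_inter]; tauto
  simp [this.length_eq]

-- processing (r, x) a second time is a no-op once the state dominates the (x, r) keys
theorem pvDrop (x : Int × List Int) (g : (Int × List Int) → List ((Int × List Int) × (Int × List Int)))
    (hx : x.2.Nodup) :
    ∀ (l : List (Int × List Int)), (∀ r ∈ l, r.1 ≠ x.1) → (∀ r ∈ l, r.2.Nodup) →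
    ∀ st, (∀ r ∈ l, pvGE st (pvUn x r) (pvIn x r)) →
    (l.flatMap (fun r => (r, x) :: g r)).foldl (fun st pq => pvStepA st pq.1 pq.2) st
      = (l.flatMap g).foldl (fun st pq => pvStepA st pq.1 pq.2) st := by
  intro l
  induction l with
  | nil => intro _ _ st _; rfl
  | cons r l ih =>
    intro hkey hval st hge
    simp only [List.flatMap_cons, List.foldl_append, List.foldl_cons]
    have h1 : pvStepA st r x = st := by
      unfold pvStepA
      rw [if_neg (by simp [hkey r (List.mem_cons_self)])]
      apply pvUpd_noop
      rw [pvUn_symm (hval r List.mem_cons_self) hx, pvIn_symm (hval r List.mem_cons_self) hx]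
      exact hge r List.mem_cons_self
    rw [h1]
    exact ih (fun r' hr' => hkey r' (List.mem_cons_of_mem _ hr'))
      (fun r' hr' => hval r' (List.mem_cons_of_mem _ hr'))
      _ (fun r' hr' => pvGE_foldl _ _ (hge r' (List.mem_cons_of_mem _ hr')))

theorem pvMain : ∀ (items : List (Int × List Int)),
    (items.map Prod.fst).Nodup → (∀ p ∈ items, p.2.Nodup) → ∀ st,
    ((items.flatMap (fun p => items.map (fun q => (p, q)))).foldl
        (fun st pq => pvStepA st pq.1 pq.2) st)
      = (pvPairs items).foldl (fun st pq => pvUpd st pq.1 pq.2) st := by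
  intro items
  induction items with
  | nil => intro _ _ st; rfl
  | cons x xs ih =>
    intro hnd hval st
    have hndx : x.1 ∉ xs.map Prod.fst := by
      simp only [List.map_cons, List.nodup_cons] at hnd; exact hnd.1
    have hkey : ∀ q ∈ xs, x.1 ≠ q.1 := by
      intro q hq hEq; exact hndx (hEq ▸ List.mem_map_of_mem hq)
    have hvx : x.2.Nodup := hval x (List.mem_cons_self)
    have hvxs : ∀ p ∈ xs, p.2.Nodup := fun p hp => hval p (List.mem_cons_of_mem _ hp)
    -- unfold one layer of both pair lists
    simp only [List.flatMap_cons, List.map_cons, List.foldl_append, List.foldl_cons, pvPairs]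
    have hxx : pvStepA st x x = st := by unfold pvStepA; simp
    rw [hxx]
    -- the shared prefix: the (x, q) pairs, q ∈ xs
    have hpre : (xs.map (fun q => (x, q))).foldl (fun st pq => pvStepA st pq.1 pq.2) st
        = (xs.map (fun q => (x, q))).foldl (fun st pq => pvUpd st pq.1 pq.2) st := by
      apply PySem.List.foldl_congr_mem
      intro acc pq hpq
      obtain ⟨q, hq, rfl⟩ := List.mem_map.mp hpq
      unfold pvStepA
      simp [hkey q hq]
    set st1 := (xs.map (fun q => (x, q))).foldl (fun st pq => pvStepA st pq.1 pq.2) st with hst1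
    have hinv : ∀ r ∈ xs, pvGE st1 (pvUn x r) (pvIn x r) :=
      fun r hr => pvGE_after_prefix x xs hkey st r hr
    rw [pvDrop x (fun r => xs.map (fun q => (r, q))) hvx xs
        (fun r hr => fun hEq => (hkey r hr) hEq.symm) hvxs st1 hinv]
    rw [ih (by simp only [List.map_cons, List.nodup_cons] at hnd; exact hnd.2) hvxs st1]
    rw [hpre]

-- ===== VERDICT (by name: the statement is the Claim_ definition above) =====
theorem pvNested_eq_flat (items : List (Int × List Int)) (st : Int × Int × Int × Int) :
    items.foldl (fun st p => items.foldl (fun st q => pvStepA st p q) st) st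
      = ((items.flatMap (fun p => items.map (fun q => (p, q)))).foldl
          (fun st pq => pvStepA st pq.1 pq.2) st) := by
  rw [List.foldl_flatMap]
  apply PySem.List.foldl_congr_mem
  intro acc p _
  rw [List.foldl_map]

theorem pvItems_keys_nodup (sets : List (Int × List Int)) :
    ((pvItems sets).map Prod.fst).Nodup := by
  have h := PySem.Dict.nodup_keys_ofList sets
  simpa [pvItems, List.map_map, Function.comp, PySem.Dict.keys] using h

theorem pvItems_vals_nodup (sets : List (Int × List Int)) :
    ∀ p ∈ pvItems sets, p.2.Nodup := by
  intro p hp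
  simp only [pvItems, List.mem_map] at hp
  obtain ⟨q, _, rfl⟩ := hp
  exact PySem.Set.nodup_ofList _

theorem biggest_union_spec : Claim_equal_biggest_union := by
  intro sets _
  unfold Spec_biggest_union
  show biggest_union sets = biggest_union_alt sets
  have eA : biggest_union sets
      = (fun st : Int × Int × Int × Int => (st.1, st.2.1))
        ((pvItems sets).foldl
          (fun st p => (pvItems sets).foldl (fun st q => pvStepA st p q) st) (0, 0, 0, 0)) := rfl
  have eB : biggest_union_alt sets
      = (fun st : Int × Int × Int × Int => (st.1, st.2.1))
        ((pvPairs (pvItems sets)).foldl (fun st pq => pvUpd st pq.1 pq.2) (0, 0, 0, 0)) := rfl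
  rw [eA, eB, pvNested_eq_flat,
    pvMain (pvItems sets) (pvItems_keys_nodup sets) (pvItems_vals_nodup sets)]
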